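-- pv_equiv track=rewrite | github.com/lorimbo/lorimbo_incremental | autoquester.py | convertlocation
-- ===== SOURCE A (Python) =====
-- def convertlocation(string):
--     finalproduct=''
--     for e in string:
--         if e=='[':
--             finalproduct += (e + "'")
--         elif e == ',':
--             finalproduct += "','"
--         elif e==']':
--             finalproduct+=("']")
--         else:
--             finalproduct+=e
--     return finalproduct
-- ===== SOURCE B (Python) =====
-- def convertlocation(string):
--     # Boundary-insertion algorithm: instead of substituting each special
--     # character by a replacement chunk, walk the string keeping the previous
--     # character and insert a quote at each boundary: after a '[' or ',' just
--     # emitted, and before a ',' or ']' about to be emitted.  Both quotes may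
--     # appear at one boundary (e.g. "[,").  A final quote closes a trailing
--     # '[' or ','.
--     pieces = []
--     prev = None
--     for c in string:
--         if prev == '[' or prev == ',':
--             pieces.append("'")
--         if c == ',' or c == ']':
--             pieces.append("'")
--         pieces.append(c)
--         prev = c
--     if prev == '[' or prev == ',':
--         pieces.append("'")
--     return ''.join(pieces)
-- ===== Notes on version B (the rewrite author's own statement) =====
-- stated objective: alternative
-- what changed: Replaces A's three-way per-character substitution (each special char mapped to a multi-char replacement chunk) by a boundary-insertion scan that tracks the previous character and inserts a lone quote at each boundary (after '['/',' and before ','/']'), plus a closing quote for a trailing '['/','.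
import Mathlib
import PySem

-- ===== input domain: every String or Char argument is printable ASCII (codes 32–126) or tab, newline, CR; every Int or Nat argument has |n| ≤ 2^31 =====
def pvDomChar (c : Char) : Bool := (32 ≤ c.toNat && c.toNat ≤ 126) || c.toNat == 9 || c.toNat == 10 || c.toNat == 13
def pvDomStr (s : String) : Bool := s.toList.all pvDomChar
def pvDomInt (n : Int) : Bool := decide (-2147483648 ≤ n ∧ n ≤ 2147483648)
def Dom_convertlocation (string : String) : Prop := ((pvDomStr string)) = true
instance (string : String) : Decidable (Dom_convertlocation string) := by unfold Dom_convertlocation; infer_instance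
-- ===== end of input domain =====

-- B replaces A's per-character chunk substitution by a boundary-insertion scan
-- tracking the previous character (alternative decomposition, same cost).

-- ===== PORT A =====
def convertlocation (string : String) : String :=
  string.toList.foldl (fun finalproduct e =>
    if e = '[' then finalproduct ++ (String.ofList [e] ++ "'")
    else if e = ',' then finalproduct ++ "','"
    else if e = ']' then finalproduct ++ "']"
    else finalproduct ++ String.ofList [e]) ""

-- ===== PORT B =====
-- Source B keeps a list `pieces` of one-character strings and joins at the end;
-- here the join of those pieces is represented directly as the List Char they
-- flatten to (exact: ''.join over single-char pieces is concatenation).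
def convertlocation_altStep (st : List Char × Option Char) (c : Char) : List Char × Option Char :=
  let p1 := if st.2 = some '[' ∨ st.2 = some ',' then st.1 ++ ['\''] else st.1
  let p2 := if c = ',' ∨ c = ']' then p1 ++ ['\''] else p1
  (p2 ++ [c], some c)

def convertlocation_alt (string : String) : String :=
  let r := string.toList.foldl convertlocation_altStep ([], none)
  String.ofList (if r.2 = some '[' ∨ r.2 = some ',' then r.1 ++ ['\''] else r.1)

-- ===== PRECONDITION & SPEC =====
def Spec_convertlocation (string : String) (out : String) : Prop := out = convertlocation_alt string
instance (string : String) (out : String) : Decidable (Spec_convertlocation string out) := by unfold Spec_convertlocation; infer_instance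

-- ===== CLAIM (what is proved, stated in full; the proofs are below) =====
def Claim_equal_convertlocation : Prop := ∀ (string : String), Dom_convertlocation string → Spec_convertlocation string (convertlocation string)

-- ===== LEMMAS AND PROOFS =====

-- the chunk A emits for a single character
def pvChunk (e : Char) : List Char :=
  if e = '[' then ['[', '\'']
  else if e = ',' then ['\'', ',', '\'']
  else if e = ']' then ['\'', ']']
  else [e]

-- the closing quote Source B appends when the previous character was '[' or ','
def pvPost (p : Option Char) : List Char :=
  if p = some '[' ∨ p = some ',' then ['\''] else []

theorem pv_portA_toList (l : List Char) (acc : String) :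
    (l.foldl (fun finalproduct e =>
      if e = '[' then finalproduct ++ (String.ofList [e] ++ "'")
      else if e = ',' then finalproduct ++ "','"
      else if e = ']' then finalproduct ++ "']"
      else finalproduct ++ String.ofList [e]) acc).toList
    = acc.toList ++ l.flatMap pvChunk := by
  induction l generalizing acc with
  | nil => simp
  | cons c t ih =>
    by_cases h1 : c = '['
    · subst h1; simp [ih, pvChunk]
    · by_cases h2 : c = ','
      · subst h2; simp [ih, pvChunk]
      · by_cases h3 : c = ']'
        · subst h3; simp [ih, pvChunk]
        · simp [h1, h2, h3, ih, pvChunk]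

-- invariant of B's boundary scan: finishing the fold started from (acc, prev)
-- yields acc, the pending closing quote for prev, then A's chunks
theorem pv_portB_invariant (l : List Char) :
    ∀ (acc : List Char) (prev : Option Char),
      (let r := l.foldl convertlocation_altStep (acc, prev)
       if r.2 = some '[' ∨ r.2 = some ',' then r.1 ++ ['\''] else r.1)
      = acc ++ pvPost prev ++ l.flatMap pvChunk := by
  induction l with
  | nil =>
    intro acc prev
    simp only [List.foldl_nil, List.flatMap_nil, List.append_nil, pvPost]
    split <;> simp_all
  | cons c t ih =>
    intro acc prev
    simp only [List.foldl_cons]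
    rw [show (convertlocation_altStep (acc, prev) c)
        = (acc ++ pvPost prev ++ (if c = ',' ∨ c = ']' then ['\''] else []) ++ [c], some c) by
      simp only [convertlocation_altStep, pvPost]
      split <;> split <;> simp]
    rw [ih]
    have hc : pvPost (some c) = (if c = '[' ∨ c = ',' then ['\''] else []) := by
      simp [pvPost]
    rw [hc]
    have : (if c = ',' ∨ c = ']' then ['\''] else []) ++ [c]
        ++ (if c = '[' ∨ c = ',' then ['\''] else []) = pvChunk c := by
      by_cases h1 : c = '[' <;> by_cases h2 : c = ',' <;> by_cases h3 : c = ']' <;>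
        simp_all [pvChunk]
    simp only [List.flatMap_cons, List.append_assoc, this]

-- ===== VERDICT (by name: the statement is the Claim_ definition above) =====
theorem convertlocation_spec : Claim_equal_convertlocation := by
  unfold Claim_equal_convertlocation
  intro s _
  unfold Spec_convertlocation convertlocation convertlocation_alt
  apply String.ext
  rw [pv_portA_toList]
  have := pv_portB_invariant s.toList [] none
  simp only [pvPost, List.nil_append] at this ⊢
  simp [this]
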